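-- pv_equiv track=rewrite | github.com/WPeter2905/kozeleti | fill_word_template.py | point_to_grade_index
-- ===== SOURCE A (Python) =====
-- from typing import List, Dict, Any
--
-- def get_grade_ranges(points_list: List[int]) -> List[tuple]:
--     """Convert points list to grade ranges."""
--     if not points_list:
--         return []
--
--     ranges = []
--     prev = 0
--     for p in points_list:
--         if p < prev:
--             continue
--         ranges.append((prev, p))
--         prev = p + 1
--
--     return ranges
--
-- def point_to_grade_index(point_value: int, points_list: List[int]) -> int:
--     """Convert actual point value to grade index (0-based)."""
--     if point_value is None or point_value == 0:
--         return -1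
--
--     ranges = get_grade_ranges(points_list)
--     for idx, (min_p, max_p) in enumerate(ranges):
--         if min_p <= point_value <= max_p:
--             return idx
--
--     return -1
-- ===== SOURCE B (Python) =====
-- from typing import List
--
-- def point_to_grade_index(point_value: int, points_list: List[int]) -> int:
--     """Convert actual point value to grade index (0-based), single fused pass."""
--     if point_value is None or point_value == 0:
--         return -1
--     prev = 0
--     idx = 0
--     for p in points_list:
--         if p < prev:
--             continue
--         if prev <= point_value <= p:
--             return idx
--         idx += 1
--         prev = p + 1
--     return -1
-- ===== Notes on version B (the rewrite author's own statement) =====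
-- stated objective: simpler
-- what changed: Fuses A's two phases (build a range list, then scan it with enumerate) into one pass that keeps only a running lower bound and counter, never materialising the range list.
import Mathlib
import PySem

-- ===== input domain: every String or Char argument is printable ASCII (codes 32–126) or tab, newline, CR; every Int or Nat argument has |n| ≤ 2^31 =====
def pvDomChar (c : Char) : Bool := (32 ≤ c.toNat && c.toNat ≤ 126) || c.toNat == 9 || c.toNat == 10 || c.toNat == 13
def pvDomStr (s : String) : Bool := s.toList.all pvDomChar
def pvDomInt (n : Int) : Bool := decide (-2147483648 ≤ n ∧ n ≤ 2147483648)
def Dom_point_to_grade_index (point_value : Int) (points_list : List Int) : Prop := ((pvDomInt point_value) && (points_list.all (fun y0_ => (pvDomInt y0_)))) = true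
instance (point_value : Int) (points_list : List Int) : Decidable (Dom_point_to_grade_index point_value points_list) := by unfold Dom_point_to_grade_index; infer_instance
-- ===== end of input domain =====

-- B fuses A's build-ranges-then-scan into one O(1)-space pass (objective: simpler).

-- ===== PORT A =====
-- get_grade_ranges's loop: append (prev,p) unless p < prev, then prev = p + 1
def pvGradeRanges : List Int → Int → List (Int × Int)
  | [], _ => []
  | p :: rest, prev =>
    if p < prev then pvGradeRanges rest prev
    else (prev, p) :: pvGradeRanges rest (p + 1)

-- the enumerate scan in point_to_grade_index
def pvScanRanges : List (Int × Int) → Int → Int → Int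
  | [], _, _ => -1
  | (mn, mx) :: rest, pv, idx =>
    if mn ≤ pv ∧ pv ≤ mx then idx else pvScanRanges rest pv (idx + 1)

def point_to_grade_index (point_value : Int) (points_list : List Int) : Int :=
  if point_value = 0 then -1
  else pvScanRanges (pvGradeRanges points_list 0) point_value 0

-- ===== PORT B =====
def pvFused : List Int → Int → Int → Int → Int
  | [], _, _, _ => -1
  | p :: rest, pv, prev, idx =>
    if p < prev then pvFused rest pv prev idx
    else if prev ≤ pv ∧ pv ≤ p then idx
    else pvFused rest pv (p + 1) (idx + 1)

def point_to_grade_index_alt (point_value : Int) (points_list : List Int) : Int :=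
  if point_value = 0 then -1
  else pvFused points_list point_value 0 0

-- ===== PRECONDITION & SPEC =====
def Spec_point_to_grade_index (point_value : Int) (points_list : List Int) (out : Int) : Prop := out = point_to_grade_index_alt point_value points_list
instance (point_value : Int) (points_list : List Int) (out : Int) : Decidable (Spec_point_to_grade_index point_value points_list out) := by unfold Spec_point_to_grade_index; infer_instance

-- ===== CLAIM (what is proved, stated in full; the proofs are below) =====
def Claim_equal_point_to_grade_index : Prop := ∀ (point_value : Int) (points_list : List Int), Dom_point_to_grade_index point_value points_list → Spec_point_to_grade_index point_value points_list (point_to_grade_index point_value points_list)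

-- ===== LEMMAS AND PROOFS =====
theorem scan_gradeRanges_eq_fused (l : List Int) (pv prev idx : Int) :
    pvScanRanges (pvGradeRanges l prev) pv idx = pvFused l pv prev idx := by
  induction l generalizing prev idx with
  | nil => rfl
  | cons p rest ih =>
    simp only [pvGradeRanges, pvFused]
    split_ifs with h1 h2
    · exact ih prev idx
    · simp [pvScanRanges, h2]
    · simp only [pvScanRanges, if_neg h2]
      exact ih (p + 1) (idx + 1)

-- ===== VERDICT (by name: the statement is the Claim_ definition above) =====
theorem point_to_grade_index_spec : Claim_equal_point_to_grade_index := by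
  intro pv pl _
  unfold Spec_point_to_grade_index point_to_grade_index point_to_grade_index_alt
  split_ifs with h
  · rfl
  · exact scan_gradeRanges_eq_fused pl pv 0 0
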